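-- pv_equiv track=rewrite | github.com/theme-ontology/python-totolo | totolo/lib/textformat.py | remove_wordwrap
-- ===== SOURCE A (Python) =====
-- def remove_wordwrap(text):
--     """
--     Remove single newline characters (i.e. '\n') from string, but leave double
--     newlines (i.e. '\n\n').
--     """
--     text_blocks = text.split("\n")
--     dewordwraped_text_block = []
--     dewordwraped_text_blocks = []
--
--     for text_block in text_blocks:
--         text_block = text_block.strip()
--
--         if not text_block:
--             if dewordwraped_text_block:
--                 dewordwraped_text_blocks.append(" ".join(dewordwraped_text_block))
--             dewordwraped_text_block = []
--         else:
--             dewordwraped_text_block.append(text_block)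
--
--     if dewordwraped_text_block:
--         dewordwraped_text_blocks.append(" ".join(dewordwraped_text_block))
--
--     return "\n\n".join(dewordwraped_text_blocks)
-- ===== SOURCE B (Python) =====
-- def remove_wordwrap(text):
--     lines = [line.strip() for line in text.split("\n")]
--     bounds = [-1] + [i for i, line in enumerate(lines) if not line] + [len(lines)]
--     paragraphs = []
--     for a, b in zip(bounds, bounds[1:]):
--         if b - a > 1:
--             paragraphs.append(" ".join(lines[a + 1:b]))
--     return "\n\n".join(paragraphs)
-- ===== Notes on version B (the rewrite author's own statement) =====
-- stated objective: alternative
-- what changed: Replaces A's streaming accumulator-and-flush loop with a staged index-based algorithm: strip all lines, compute the list of blank-line boundary indices, then slice each paragraph out between consecutive boundaries and join the slices.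
import Mathlib
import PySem

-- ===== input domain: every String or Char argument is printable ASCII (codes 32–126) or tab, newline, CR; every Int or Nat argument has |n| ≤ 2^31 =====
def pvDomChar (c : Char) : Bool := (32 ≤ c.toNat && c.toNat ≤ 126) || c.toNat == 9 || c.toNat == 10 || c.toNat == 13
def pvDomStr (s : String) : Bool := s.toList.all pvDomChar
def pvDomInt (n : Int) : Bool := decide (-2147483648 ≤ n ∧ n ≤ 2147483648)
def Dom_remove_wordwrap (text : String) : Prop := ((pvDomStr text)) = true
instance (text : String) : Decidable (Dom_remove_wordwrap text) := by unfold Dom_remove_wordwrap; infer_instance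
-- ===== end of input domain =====

-- B replaces A's accumulator-and-flush loop with a staged index-based algorithm (blank-line
-- boundary indices, then paragraph slices between consecutive boundaries); objective: alternative, same cost.

-- ===== PORT A =====
-- loop body of A: state = (current block, finished blocks); the line is already stripped
def pvStepA (st : List (List Char) × List (List Char)) (tb : List Char) :
    List (List Char) × List (List Char) :=
  if tb = [] then
    (if st.1 = [] then ([], st.2) else ([], st.2 ++ [PySem.Chars.join [' '] st.1]))
  else
    (st.1 ++ [tb], st.2)

-- A's trailing 'if dewordwraped_text_block: append(...)'
def pvFlushA (st : List (List Char) × List (List Char)) : List (List Char) :=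
  if st.1 = [] then st.2 else st.2 ++ [PySem.Chars.join [' '] st.1]

def remove_wordwrap (text : String) : String :=
  String.ofList (PySem.Chars.join ['\n', '\n'] (pvFlushA
    ((PySem.Chars.splitOn text.toList ['\n']).foldl
      (fun st tb => pvStepA st (PySem.Chars.strip tb)) ([], []))))

-- ===== PORT B =====
def remove_wordwrap_alt (text : String) : String :=
  let lines := (PySem.Chars.splitOn text.toList ['\n']).map PySem.Chars.strip
  let bounds : List Int :=
    [-1] ++ (PySem.List.enumerate lines).filterMap
      (fun p => if p.2 = [] then some p.1 else none) ++ [(lines.length : Int)]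
  let paragraphs := (bounds.zip bounds.tail).foldl
    (fun acc ab =>
      if ab.2 - ab.1 > 1 then
        acc ++ [PySem.Chars.join [' '] (PySem.List.slice lines (some (ab.1 + 1)) (some ab.2))]
      else acc) []
  String.ofList (PySem.Chars.join ['\n', '\n'] paragraphs)

-- ===== PRECONDITION & SPEC =====
def Spec_remove_wordwrap (text : String) (out : String) : Prop := out = remove_wordwrap_alt text
instance (text : String) (out : String) : Decidable (Spec_remove_wordwrap text out) := by unfold Spec_remove_wordwrap; infer_instance

-- ===== CLAIM (what is proved, stated in full; the proofs are below) =====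
def Claim_equal_remove_wordwrap : Prop := ∀ (text : String), Dom_remove_wordwrap text → Spec_remove_wordwrap text (remove_wordwrap text)

-- ===== LEMMAS AND PROOFS =====

-- A's loop result as a function of the pending block and the remaining (stripped) lines
def pvAux (cur : List (List Char)) : List (List Char) → List (List Char)
  | [] => if cur = [] then [] else [PySem.Chars.join [' '] cur]
  | x :: xs =>
    if x = [] then
      (if cur = [] then pvAux [] xs else PySem.Chars.join [' '] cur :: pvAux [] xs)
    else pvAux (cur ++ [x]) xs

theorem pvFold_spec (ls : List (List Char)) : ∀ cur out,
    pvFlushA (ls.foldl pvStepA (cur, out)) = out ++ pvAux cur ls := by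
  induction ls with
  | nil =>
    intro cur out
    by_cases h : cur = [] <;> simp [pvFlushA, pvAux, h]
  | cons x xs ih =>
    intro cur out
    by_cases hx : x = []
    · by_cases hc : cur = [] <;>
        simp [pvStepA, pvAux, hx, hc, ih, List.append_assoc]
    · simp [pvStepA, pvAux, hx, ih]

-- B-side: relative blank-line indices of the stripped lines
def pvBlanks : List (List Char) → List Int
  | [] => []
  | x :: xs => (if x = [] then [(0 : Int)] else []) ++ (pvBlanks xs).map (· + 1)

-- B's loop over consecutive boundary pairs, as a recursion on the marker list
def pvPP (L : List (List Char)) : Int → List Int → List (List Char)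
  | _, [] => []
  | a, b :: bs =>
    (if b - a > 1 then
      [PySem.Chars.join [' '] (PySem.List.slice L (some (a + 1)) (some b))]
    else []) ++ pvPP L b bs

theorem pvBlanks_nonneg (xs : List (List Char)) : ∀ b ∈ pvBlanks xs, 0 ≤ b := by
  induction xs with
  | nil => simp [pvBlanks]
  | cons x xs ih =>
    intro b hb
    simp only [pvBlanks, List.mem_append, List.mem_map] at hb
    rcases hb with hb | ⟨c, hc, rfl⟩
    · split at hb <;> simp_all
    · have := ih c hc; omega

theorem pvEnum_spec (xs : List (List Char)) : ∀ s : Int,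
    (PySem.List.enumerate xs s).filterMap
      (fun p => if p.2 = [] then some p.1 else none) = (pvBlanks xs).map (· + s) := by
  induction xs with
  | nil => intro s; simp [pvBlanks, PySem.List.enumerate_nil]
  | cons x xs ih =>
    intro s
    by_cases hx : x = [] <;>
      simp [PySem.List.enumerate_cons, pvBlanks, hx, ih (s + 1),
        Function.comp, add_comm, add_left_comm, add_assoc]

theorem pvFoldB_spec (L : List (List Char)) (bs : List Int) : ∀ (a : Int) (out : List (List Char)),
    (((a :: bs).zip bs).foldl
      (fun acc ab =>
        if ab.2 - ab.1 > 1 then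
          acc ++ [PySem.Chars.join [' '] (PySem.List.slice L (some (ab.1 + 1)) (some ab.2))]
        else acc) out) = out ++ pvPP L a bs := by
  induction bs with
  | nil => intro a out; simp [pvPP]
  | cons b bs ih =>
    intro a out
    by_cases h : b - a > 1 <;> simp [pvPP, h, ih b, List.append_assoc]

-- shifting all markers by the length of a dropped prefix
theorem pvPP_shift (P ys : List (List Char)) (bs : List Int) : ∀ a : Int, -1 ≤ a →
    (∀ b ∈ bs, 0 ≤ b) →
    pvPP (P ++ ys) (a + P.length) (bs.map (· + (P.length : Int))) = pvPP ys a bs := by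
  induction bs with
  | nil => intro a _ _; simp [pvPP]
  | cons b bs ih =>
    intro a ha hb
    have hb0 : 0 ≤ b := hb b (by simp)
    have hrec := ih b (by omega) (fun c hc => hb c (by simp [hc]))
    have hcond : (b + (P.length : Int)) - (a + P.length) > 1 ↔ b - a > 1 := by omega
    have hslice : PySem.List.slice (P ++ ys) (some (a + (P.length : Int) + 1)) (some (b + P.length))
        = PySem.List.slice ys (some (a + 1)) (some b) := by
      rw [PySem.List.slice_toNat _ (by omega) (by omega),
          PySem.List.slice_toNat _ (by omega) hb0]
      have h1 : (a + (P.length : Int) + 1).toNat = P.length + (a + 1).toNat := by omega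
      have h2 : (b + (P.length : Int)).toNat = b.toNat + P.length := by omega
      rw [h1, h2]
      have hdrop : (P ++ ys).drop (P.length + (a + 1).toNat) = ys.drop ((a + 1).toNat) := by
        simp [List.drop_append]
      rw [hdrop]
      congr 1
      omega
    simp only [pvPP, List.map_cons]
    rw [hslice, hrec]
    by_cases h : b - a > 1
    · simp [h, hcond.mpr h]
    · have : ¬ ((b + (P.length : Int)) - (a + P.length) > 1) := by omega
      simp [h, this]

theorem pvMap_add_add (l : List Int) (c d : Int) :
    (l.map (· + c)).map (· + d) = l.map (· + (c + d)) := by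
  simp only [List.map_map]
  congr 1
  funext x
  simp [Function.comp]
  ring

-- main invariant: B's pair walk over pre ++ xs equals A's loop with pending block pre
theorem pvMain (xs : List (List Char)) : ∀ pre : List (List Char), (∀ l ∈ pre, l ≠ []) →
    pvPP (pre ++ xs) (-1)
      ((pvBlanks xs).map (· + (pre.length : Int)) ++ [(pre.length : Int) + (xs.length : Int)])
      = pvAux pre xs := by
  induction xs with
  | nil =>
    intro pre hpre
    by_cases hp : pre = []
    · subst hp; simp [pvBlanks, pvPP, pvAux]
    · have hm : 0 < pre.length := List.length_pos_iff.mpr hp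
      have hcond : ((pre.length : Int)) - (-1) > 1 := by omega
      simp only [pvBlanks, List.map_nil, List.nil_append, List.length_nil, Nat.cast_zero,
        add_zero, List.append_nil, pvPP, pvAux, hcond, if_true, if_neg hp]
      simp [show ((-1 : Int) + 1) = 0 by norm_num, PySem.List.slice_to_natCast, List.take_length]
  | cons y ys ih =>
    intro xpre hxpre
    have hb' : ∀ b ∈ (pvBlanks ys).map (· + ((0:ℕ) : Int)) ++
        [((0:ℕ) : Int) + (ys.length : Int)], 0 ≤ b := by
      intro b hb
      simp only [List.mem_append, List.mem_map, List.mem_singleton] at hb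
      rcases hb with ⟨c, hc, rfl⟩ | rfl
      · have := pvBlanks_nonneg ys c hc; omega
      · omega
    by_cases hy : y = []
    · subst hy
      have hIH := ih [] (by simp)
      have hshift := pvPP_shift (xpre ++ [[]]) ys
        ((pvBlanks ys).map (· + ((0:ℕ) : Int)) ++ [((0:ℕ) : Int) + (ys.length : Int)])
        (-1) (by omega) hb'
      have hmark : ((pvBlanks ys).map (· + ((0:ℕ) : Int)) ++
          [((0:ℕ) : Int) + (ys.length : Int)]).map (· + ((xpre ++ [[]]).length : Int))
          = ((pvBlanks ys).map (· + (1:Int))).map (· + (xpre.length : Int))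
            ++ [(xpre.length : Int) + (((List.cons ([] : List Char) ys).length : ℕ) : Int)] := by
        rw [List.map_append, pvMap_add_add, pvMap_add_add]
        simp only [List.length_append, List.length_cons, List.length_nil, List.map_cons,
          List.map_nil]
        push_cast
        congr 1
        · congr 1
          funext x
          ring
        · simp only [List.cons.injEq, and_true]
          ring
      have ha : (-1 : Int) + ((xpre ++ [[]]).length : Int) = 0 + (xpre.length : Int) := by
        simp [List.length_append]
      rw [hmark, ha, List.append_assoc] at hshift
      simp only [List.cons_append, List.nil_append, List.length_nil, Nat.cast_zero,
        zero_add] at hshift hIH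
      have htail := hshift.trans hIH
      rw [pvMap_add_add] at htail
      simp only [List.length_cons, Nat.cast_add, Nat.cast_one] at htail
      by_cases hp : xpre = []
      · subst hp
        simp only [List.nil_append, List.length_nil, Nat.cast_zero, zero_add,
          add_zero] at htail ⊢
        simp [pvBlanks, pvPP, pvAux, Function.comp_def, htail]
      · have hm : 0 < xpre.length := List.length_pos_iff.mpr hp
        have hslice : PySem.List.slice (xpre ++ ([] :: ys)) (some ((-1 : Int) + 1))
            (some ((0 : Int) + (xpre.length : Int))) = xpre := by
          norm_num
        simp only [List.cons_append, List.nil_append, zero_add] at htail hslice ⊢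
        simp [pvBlanks, pvPP, pvAux, hp, hm, htail, hslice]
    · have hIH := ih (xpre ++ [y]) (by
        intro l hl
        rcases List.mem_append.mp hl with h | h
        · exact hxpre l h
        · simp only [List.mem_singleton] at h; subst h; exact hy)
      simp only [List.length_append, List.length_cons, List.length_nil, List.append_assoc,
        List.cons_append, List.nil_append, Nat.cast_add, Nat.cast_one] at hIH
      have hbl : pvBlanks (y :: ys) = (pvBlanks ys).map (· + 1) := by simp [pvBlanks, hy]
      rw [hbl, pvMap_add_add]
      simp only [List.length_cons, Nat.cast_add, Nat.cast_one]
      have hpv : pvAux xpre (y :: ys) = pvAux (xpre ++ [y]) ys := by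
        rw [pvAux]; simp [hy]
      rw [hpv, ← hIH]
      congr 1
      congr 1
      · congr 1
        funext x
        ring
      · simp only [List.cons.injEq, and_true]
        ring

-- ===== VERDICT (by name: the statement is the Claim_ definition above) =====
theorem remove_wordwrap_spec : Claim_equal_remove_wordwrap := by
  intro text _
  unfold Spec_remove_wordwrap remove_wordwrap remove_wordwrap_alt
  rw [← List.foldl_map (f := PySem.Chars.strip) (g := pvStepA), pvFold_spec]
  simp only [List.nil_append]
  set L := (PySem.Chars.splitOn text.toList ['\n']).map PySem.Chars.strip with hL
  rw [pvEnum_spec L 0]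
  have hmain := pvMain L [] (by simp)
  simp only [List.length_nil, Nat.cast_zero, List.nil_append, zero_add] at hmain
  simp only [List.cons_append, List.nil_append, List.append_assoc, List.tail_cons]
  rw [pvFoldB_spec, List.nil_append, ← hmain]
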